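-- pv_equiv track=rewrite | github.com/Kims-DeveloperGroup/sprint-runtime | workflows/state/backlog_store.py | backlog_status_counts
-- ===== SOURCE A (Python) =====
-- from typing import Any, Callable
--
-- def backlog_status_counts(items: list[dict[str, Any]]) -> dict[str, int]:
--     pending = sum(1 for item in items if str(item.get("status") or "") == "pending")
--     selected = sum(1 for item in items if str(item.get("status") or "") == "selected")
--     blocked = sum(1 for item in items if str(item.get("status") or "") == "blocked")
--     done = sum(1 for item in items if str(item.get("status") or "") == "done")
--     return {
--         "pending": pending,
--         "selected": selected,
--         "blocked": blocked,
--         "done": done,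
--         "total": pending + selected + blocked,
--     }
-- ===== SOURCE B (Python) =====
-- def backlog_status_counts(items: list[dict[str, any]]) -> dict[str, int]:
--     pending = selected = blocked = done = 0
--     for item in items:
--         s = str(item.get("status") or "")
--         if s == "pending":
--             pending += 1
--         elif s == "selected":
--             selected += 1
--         elif s == "blocked":
--             blocked += 1
--         elif s == "done":
--             done += 1
--     return {
--         "pending": pending,
--         "selected": selected,
--         "blocked": blocked,
--         "done": done,
--         "total": pending + selected + blocked,
--     }
-- ===== Notes on version B (the rewrite author's own statement) =====
-- stated objective: simpler
-- what changed: Replaces A's four separate generator-sum passes over items with a single fused loop that classifies each item's normalized status once and increments one of four counters.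
import Mathlib
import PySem

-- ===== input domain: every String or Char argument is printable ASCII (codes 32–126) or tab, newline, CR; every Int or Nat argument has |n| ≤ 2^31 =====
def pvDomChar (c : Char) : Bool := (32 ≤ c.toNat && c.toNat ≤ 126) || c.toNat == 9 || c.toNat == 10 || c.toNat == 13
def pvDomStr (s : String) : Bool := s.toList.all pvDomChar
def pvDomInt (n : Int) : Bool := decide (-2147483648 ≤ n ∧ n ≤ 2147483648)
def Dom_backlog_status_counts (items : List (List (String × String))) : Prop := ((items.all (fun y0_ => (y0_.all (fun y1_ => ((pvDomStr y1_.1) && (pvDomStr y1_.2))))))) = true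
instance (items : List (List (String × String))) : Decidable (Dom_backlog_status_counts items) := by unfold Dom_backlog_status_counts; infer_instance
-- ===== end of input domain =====

-- B fuses A's four generator-sum passes into one loop classifying each status once (objective: simpler).

-- ===== PORT A =====
-- str(item.get("status") or "") with string values: missing key or "" -> "", else the value itself
def pvStatus (item : List (String × String)) : String :=
  ((PySem.Dict.mk item).get? "status").getD ""

def backlog_status_counts (items : List (List (String × String))) : List (String × Int) :=
  let pending := items.foldl (fun acc item => if pvStatus item == "pending" then acc + 1 else acc) (0 : Int)
  let selected := items.foldl (fun acc item => if pvStatus item == "selected" then acc + 1 else acc) (0 : Int)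
  let blocked := items.foldl (fun acc item => if pvStatus item == "blocked" then acc + 1 else acc) (0 : Int)
  let done := items.foldl (fun acc item => if pvStatus item == "done" then acc + 1 else acc) (0 : Int)
  [("pending", pending), ("selected", selected), ("blocked", blocked), ("done", done),
   ("total", pending + selected + blocked)]

-- ===== PORT B =====
def pvStep (acc : Int × Int × Int × Int) (item : List (String × String)) : Int × Int × Int × Int :=
  let s := pvStatus item
  if s == "pending" then (acc.1 + 1, acc.2.1, acc.2.2.1, acc.2.2.2)
  else if s == "selected" then (acc.1, acc.2.1 + 1, acc.2.2.1, acc.2.2.2)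
  else if s == "blocked" then (acc.1, acc.2.1, acc.2.2.1 + 1, acc.2.2.2)
  else if s == "done" then (acc.1, acc.2.1, acc.2.2.1, acc.2.2.2 + 1)
  else acc

def backlog_status_counts_alt (items : List (List (String × String))) : List (String × Int) :=
  let c := items.foldl pvStep ((0 : Int), (0 : Int), (0 : Int), (0 : Int))
  [("pending", c.1), ("selected", c.2.1), ("blocked", c.2.2.1), ("done", c.2.2.2),
   ("total", c.1 + c.2.1 + c.2.2.1)]

-- ===== PRECONDITION & SPEC =====
def Spec_backlog_status_counts (items : List (List (String × String))) (out : List (String × Int)) : Prop := out = backlog_status_counts_alt items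
instance (items : List (List (String × String))) (out : List (String × Int)) : Decidable (Spec_backlog_status_counts items out) := by unfold Spec_backlog_status_counts; infer_instance

-- ===== CLAIM (what is proved, stated in full; the proofs are below) =====
def Claim_equal_backlog_status_counts : Prop := ∀ (items : List (List (String × String))), Dom_backlog_status_counts items → Spec_backlog_status_counts items (backlog_status_counts items)

-- ===== LEMMAS AND PROOFS =====
def pvCnt (t : String) (items : List (List (String × String))) : Int :=
  items.foldl (fun acc item => if pvStatus item == t then acc + 1 else acc) 0

theorem pvCnt_shift (t : String) : ∀ (items : List (List (String × String))) (a : Int),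
    items.foldl (fun acc item => if pvStatus item == t then acc + 1 else acc) a = a + pvCnt t items := by
  intro items
  induction items with
  | nil => intro a; simp [pvCnt]
  | cons x xs ih =>
    intro a
    simp only [pvCnt, List.foldl_cons]
    by_cases hb : (pvStatus x == t) = true
    · rw [if_pos hb, if_pos hb, ih, ih]; omega
    · rw [if_neg hb, if_neg hb, ih]; simp [pvCnt]

theorem pvFoldB : ∀ (items : List (List (String × String))) (p s b d : Int),
    items.foldl pvStep (p, s, b, d)
      = (p + pvCnt "pending" items, s + pvCnt "selected" items,
         b + pvCnt "blocked" items, d + pvCnt "done" items) := by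
  intro items
  induction items with
  | nil => intro p s b d; simp [pvCnt]
  | cons x xs ih =>
    intro p s b d
    have hc : ∀ t : String, pvCnt t (x :: xs) = (if pvStatus x == t then (1:Int) else 0) + pvCnt t xs := by
      intro t
      simp only [pvCnt, List.foldl_cons]
      by_cases hb : (pvStatus x == t) = true
      · rw [if_pos hb, if_pos hb, pvCnt_shift t xs]; simp [pvCnt]
      · rw [if_neg hb, if_neg hb]; simp
    simp only [List.foldl_cons, hc]
    by_cases h1 : pvStatus x = "pending" <;>
      by_cases h2 : pvStatus x = "selected" <;>
      by_cases h3 : pvStatus x = "blocked" <;>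
      by_cases h4 : pvStatus x = "done" <;>
      simp_all [pvStep, ih, Prod.mk.injEq] <;> omega

-- ===== VERDICT (by name: the statement is the Claim_ definition above) =====
theorem backlog_status_counts_spec : Claim_equal_backlog_status_counts := by
  intro items _
  show backlog_status_counts items = backlog_status_counts_alt items
  have h : ∀ t : String, items.foldl (fun acc item => if pvStatus item == t then acc + 1 else acc) (0:Int) = pvCnt t items := by
    intro t; rw [pvCnt_shift]; omega
  unfold backlog_status_counts backlog_status_counts_alt
  simp only [pvFoldB, h, zero_add]
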